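-- pv_equiv track=rewrite | github.com/hallis21/AOC24 | 23/23.py | find_cliques
-- ===== SOURCE A (Python) =====
-- def is_clique(nodes, group):
--     for node in group:
--         for other in group:
--             if node != other and other not in nodes[node]:
--                 return False
--     return True
--
-- def find_cliques(nodes, start, size=3):
--     cliques = set()
--     current_clique = {start}
--
--     def extend_clique(current):
--         if len(current) == size:
--             cliques.add(tuple(sorted(current)))
--             return
--
--         candidates = set(nodes[start])
--         for node in current:
--             candidates &= set(nodes[node])
--
--         for candidate in candidates - current:
--             if is_clique(nodes, current | {candidate}):
--                 current.add(candidate)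
--                 extend_clique(current)
--                 current.remove(candidate)
--
--     extend_clique(current_clique)
--     return cliques
-- ===== SOURCE B (Python) =====
-- from itertools import combinations
--
--
-- def is_clique(nodes, group):
--     for node in group:
--         for other in group:
--             if node != other and other not in nodes[node]:
--                 return False
--     return True
--
--
-- def find_cliques(nodes, start, size=3):
--     # Direct combinatorial enumeration: every size-k clique containing `start`
--     # is {start} plus a (size-1)-subset of start's neighbourhood.
--     if size < 1:
--         return set()
--     if size == 1:
--         return {(start,)}
--     pool = set(nodes[start]) - {start}
--     result = set()
--     for combo in combinations(pool, size - 1):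
--         group = (start,) + combo
--         if is_clique(nodes, group):
--             result.add(tuple(sorted(group)))
--     return result
-- ===== Notes on version B (the rewrite author's own statement) =====
-- stated objective: alternative
-- what changed: Replaces the recursive backtracking extension (which re-derives the candidate intersection at every node and visits each clique once per ordering of its members) by a single pass over itertools.combinations of start's neighbour pool with one full-group is_clique test per combination.
import Mathlib
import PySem

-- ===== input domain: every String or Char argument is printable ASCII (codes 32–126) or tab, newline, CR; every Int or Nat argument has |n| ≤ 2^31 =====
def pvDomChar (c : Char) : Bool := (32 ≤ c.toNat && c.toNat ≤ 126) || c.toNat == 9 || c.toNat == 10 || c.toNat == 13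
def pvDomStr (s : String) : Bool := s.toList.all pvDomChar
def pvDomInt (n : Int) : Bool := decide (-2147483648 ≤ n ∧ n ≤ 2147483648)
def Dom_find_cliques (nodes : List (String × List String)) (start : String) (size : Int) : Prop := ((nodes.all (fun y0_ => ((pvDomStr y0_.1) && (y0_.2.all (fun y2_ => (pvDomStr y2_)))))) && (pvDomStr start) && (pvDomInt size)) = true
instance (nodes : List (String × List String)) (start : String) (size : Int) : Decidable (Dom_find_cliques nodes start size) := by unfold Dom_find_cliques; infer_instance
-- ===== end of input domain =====

-- B replaces A's recursive backtracking extension by direct enumeration of (size-1)-subsets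
-- of start's neighbour pool with a full-group clique test (alternative algorithm, same cost class).
-- Python returns a set (compared as a set); both ports canonicalize it with the same sort.


-- Both Pythons return a SET of tuples (compared as a set, no order of its own); both ports
-- return it in one canonical order: lexicographically sorted (instances pinned to the
-- LinearOrder on List String so the PySem order lemmas apply).
def canonSort (l : List (List String)) : List (List String) :=
  @PySem.List.sorted (List String) (List String) List.instLinearOrder.toLT
    (@LinearOrder.toDecidableLT _ List.instLinearOrder) l (fun x => x) false

-- ===== PORT A =====
-- is_clique(nodes, group): the early 'return False' ported as the equivalent double 'all'
def pyIsClique (nodes : PySem.Dict String (List String)) (group : List String) : Bool :=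
  group.all (fun node => group.all (fun other =>
    !(node != other && !((nodes.getD node []).contains other))))

-- extend_clique: recursion on explicit fuel (each call grows current by one member of
-- nodes[start], so fuel = |nodes[start]| + 2 is never exhausted — proved in the lemmas below);
-- 'current | {candidate}' is Set.add (candidate is drawn from candidates - current)
def extendClique (nodes : PySem.Dict String (List String)) (start : String) (size : Int) :
    Nat → List String → PySem.Set (List String) → PySem.Set (List String)
  | 0, _, cliques => cliques
  | fuel+1, current, cliques =>
    if (current.length : Int) = size then
      PySem.Set.add cliques (PySem.List.sorted current (fun x => x) false)
    else
      let candidates := current.foldl (fun cs n => PySem.Set.inter cs (nodes.getD n []))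
          (PySem.Set.ofList (nodes.getD start []))
      (PySem.Set.diff candidates current).foldl
        (fun cl c =>
          if pyIsClique nodes (PySem.Set.add current c) then
            extendClique nodes start size fuel (PySem.Set.add current c) cl
          else cl)
        cliques

def find_cliques (nodes : List (String × List String)) (start : String) (size : Int) : List (List String) :=
  let d := PySem.Dict.mk nodes
  canonSort (extendClique d start size ((d.getD start []).length + 2) [start] PySem.Set.empty)

-- ===== PORT B =====
-- size < 1 yields no groups; size == 1 base case is {(start,)}; pool = set(nodes[start]) - {start};
-- itertools.combinations over the pool, one full-group is_clique test per combination
def find_cliques_alt (nodes : List (String × List String)) (start : String) (size : Int) : List (List String) :=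
  let d := PySem.Dict.mk nodes
  if size < 1 then [] else
  if size = 1 then [[start]] else
  let pool := PySem.Set.diff (PySem.Set.ofList (d.getD start [])) [start]
  let result := (PySem.List.combinations pool (size - 1).toNat).foldl
    (fun res combo =>
      if pyIsClique d (start :: combo) then
        PySem.Set.add res (PySem.List.sorted (start :: combo) (fun x => x) false)
      else res)
    PySem.Set.empty
  canonSort result

-- ===== PRECONDITION & SPEC =====
-- Pre_ excludes exactly the inputs where Python A raises KeyError: size ≠ 1 (so extend_clique
-- evaluates nodes[start] and probes each candidate) while start, or some neighbour of start
-- other than start itself, is absent from nodes.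
def Pre_find_cliques (nodes : List (String × List String)) (start : String) (size : Int) : Prop :=
  size = 1 ∨
  ((PySem.Dict.mk nodes).contains start = true ∧
    ∀ x ∈ (PySem.Dict.mk nodes).getD start [], x = start ∨ (PySem.Dict.mk nodes).contains x = true)
instance (nodes : List (String × List String)) (start : String) (size : Int) : Decidable (Pre_find_cliques nodes start size) := by unfold Pre_find_cliques; infer_instance

def pvWitness_find_cliques : (List (String × List String)) × String × Int :=
  ([("a", ["b", "c"]), ("b", ["a", "c"]), ("c", ["a", "b"])], "a", 3)

def Spec_find_cliques (nodes : List (String × List String)) (start : String) (size : Int) (out : List (List String)) : Prop := out = find_cliques_alt nodes start size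
instance (nodes : List (String × List String)) (start : String) (size : Int) (out : List (List String)) : Decidable (Spec_find_cliques nodes start size out) := by unfold Spec_find_cliques; infer_instance

-- ===== CLAIM (what is proved, stated in full; the proofs are below) =====
def Claim_equal_find_cliques : Prop := ∀ (nodes : List (String × List String)) (start : String) (size : Int), Dom_find_cliques nodes start size → Pre_find_cliques nodes start size → Spec_find_cliques nodes start size (find_cliques nodes start size)

-- ===== LEMMAS AND PROOFS =====
def cliqueProp (d : PySem.Dict String (List String)) (g : List String) : Prop :=
  ∀ n ∈ g, ∀ o ∈ g, n ≠ o → ((d.getD n []).contains o) = true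
theorem pyIsClique_iff (d : PySem.Dict String (List String)) (g : List String) :
    pyIsClique d g = true ↔ cliqueProp d g := by
  simp only [pyIsClique, cliqueProp, List.all_eq_true]
  constructor
  · intro h n hn o ho hne
    rcases (by simpa using h n hn o ho) with h1 | h1
    · exact absurd h1 hne
    · simpa using h1
  · intro h n hn o ho
    by_cases hne : n = o
    · simp [hne]
    · simpa using Or.inr (by simpa using h n hn o ho hne)
theorem set_add_of_not_mem {α : Type} [BEq α] [LawfulBEq α] (s : PySem.Set α) (x : α)
    (hx : x ∉ s) : PySem.Set.add s x = s ++ [x] := by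
  simp [PySem.Set.add, PySem.Set.contains, hx]
theorem mem_foldl_step {α β : Type} [DecidableEq β] (t : β) (Q : α → Prop) :
    ∀ (L : List α) (step : List β → α → List β) (acc : List β),
      (∀ cl c, c ∈ L → (t ∈ step cl c ↔ t ∈ cl ∨ Q c)) →
      (t ∈ L.foldl step acc ↔ t ∈ acc ∨ ∃ c ∈ L, Q c) := by
  intro L
  induction L with
  | nil => simp
  | cons a L ih =>
    intro step acc h
    rw [List.foldl_cons, ih step _ (fun cl c hc => h cl c (List.mem_cons_of_mem a hc)),
      h acc a (List.mem_cons_self)]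
    simp only [List.mem_cons]
    constructor
    · rintro ((h1 | h1) | ⟨c, hc, hq⟩)
      · exact Or.inl h1
      · exact Or.inr ⟨a, Or.inl rfl, h1⟩
      · exact Or.inr ⟨c, Or.inr hc, hq⟩
    · rintro (h1 | ⟨c, (rfl | hc), hq⟩)
      · exact Or.inl (Or.inl h1)
      · exact Or.inl (Or.inr hq)
      · exact Or.inr ⟨c, hc, hq⟩
theorem nodup_foldl_step {α β : Type} :
    ∀ (L : List α) (step : List β → α → List β) (acc : List β),
      (∀ cl c, cl.Nodup → (step cl c).Nodup) → acc.Nodup → (L.foldl step acc).Nodup := by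
  intro L
  induction L with
  | nil => intro step acc _ h; exact h
  | cons a L ih => intro step acc hstep h; exact ih step _ hstep (hstep acc a h)
def candSet (d : PySem.Dict String (List String)) (start : String) (cur : List String) : PySem.Set String :=
  PySem.Set.diff (cur.foldl (fun cs n => PySem.Set.inter cs (d.getD n []))
    (PySem.Set.ofList (d.getD start []))) cur

theorem mem_inter_foldl (d : PySem.Dict String (List String)) (c : String) :
    ∀ (cur : List String) (s : PySem.Set String),
      c ∈ cur.foldl (fun cs n => PySem.Set.inter cs (d.getD n [])) s ↔
        c ∈ s ∧ ∀ n ∈ cur, c ∈ d.getD n [] := by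
  intro cur
  induction cur with
  | nil => simp
  | cons a cur ih =>
    intro s
    rw [List.foldl_cons, ih]
    simp [PySem.Set.mem_inter, and_assoc]

theorem mem_candSet (d : PySem.Dict String (List String)) (start : String) (cur : List String) (c : String) :
    c ∈ candSet d start cur ↔ (c ∈ d.getD start [] ∧ ∀ n ∈ cur, c ∈ d.getD n []) ∧ c ∉ cur := by
  rw [candSet, PySem.Set.mem_diff, mem_inter_foldl, PySem.Set.mem_ofList]

def Chain (d : PySem.Dict String (List String)) (start : String) (size : Int) :
    List String → List String → Prop
  | cur, [] => (cur.length : Int) = size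
  | cur, c :: ext => (cur.length : Int) ≠ size ∧ c ∈ candSet d start cur ∧
      pyIsClique d (cur ++ [c]) = true ∧ Chain d start size (cur ++ [c]) ext

theorem chain_length (d : PySem.Dict String (List String)) (start : String) (size : Int) :
    ∀ ext cur, Chain d start size cur ext → (cur.length + ext.length : Int) = size := by
  intro ext
  induction ext with
  | nil => intro cur h; simpa using h
  | cons c ext ih =>
    intro cur h
    have := ih (cur ++ [c]) h.2.2.2
    simp at this ⊢
    all_goals omega

theorem chain_subset (d : PySem.Dict String (List String)) (start : String) (size : Int) :
    ∀ ext cur, Chain d start size cur ext → ∀ c ∈ ext, c ∈ d.getD start [] := by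
  intro ext
  induction ext with
  | nil => intro cur _ c hc; simp at hc
  | cons a ext ih =>
    intro cur h c hc
    rcases List.mem_cons.1 hc with rfl | hc
    · exact ((mem_candSet d start cur c).1 h.2.1).1.1
    · exact ih (cur ++ [a]) h.2.2.2 c hc

theorem chain_nodup (d : PySem.Dict String (List String)) (start : String) (size : Int) :
    ∀ ext cur, cur.Nodup → Chain d start size cur ext → (cur ++ ext).Nodup := by
  intro ext
  induction ext with
  | nil => intro cur h _; simpa using h
  | cons c ext ih =>
    intro cur hnd h
    have hc : c ∉ cur := ((mem_candSet d start cur c).1 h.2.1).2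
    have h1 : (cur ++ [c]).Nodup := by
      simp [List.nodup_append, hnd]
      exact fun a ha hac => hc (hac ▸ ha)
    have := ih (cur ++ [c]) h1 h.2.2.2
    simpa using this

theorem chain_clique (d : PySem.Dict String (List String)) (start : String) (size : Int) :
    ∀ ext cur, pyIsClique d cur = true → Chain d start size cur ext →
      pyIsClique d (cur ++ ext) = true := by
  intro ext
  induction ext with
  | nil => intro cur h _; simpa using h
  | cons c ext ih =>
    intro cur _ h
    have := ih (cur ++ [c]) h.2.2.1 h.2.2.2
    simpa using this

theorem cliqueProp_subset' (d : PySem.Dict String (List String)) {g g' : List String}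
    (hs : g' ⊆ g) (h : cliqueProp d g) : cliqueProp d g' :=
  fun n hn o ho => h n (hs hn) o (hs ho)

theorem chain_of (d : PySem.Dict String (List String)) (start : String) (size : Int) :
    ∀ ext cur, (cur ++ ext).Nodup → (∀ c ∈ ext, c ∈ d.getD start []) →
      cliqueProp d (cur ++ ext) → (cur.length + ext.length : Int) = size →
      Chain d start size cur ext := by
  intro ext
  induction ext with
  | nil => intro cur _ _ _ hlen; simpa using hlen
  | cons c ext ih =>
    intro cur hnd hsub hcl hlen
    have hclen : (cur.length + 1 + ext.length : Int) = size := by simp at hlen; omega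
    have hcnotin : c ∉ cur := by
      intro h
      exact (List.disjoint_of_nodup_append hnd) h List.mem_cons_self
    refine ⟨by omega, ?_, ?_, ?_⟩
    · rw [mem_candSet]
      refine ⟨⟨hsub c List.mem_cons_self, ?_⟩, hcnotin⟩
      intro n hn
      have hne : n ≠ c := fun h => hcnotin (h ▸ hn)
      have := hcl n (by simp [hn]) c (by simp) hne
      simpa [List.contains_iff_mem] using this
    · rw [pyIsClique_iff]
      refine cliqueProp_subset' d ?_ hcl
      intro x hx
      rcases List.mem_append.1 hx with hx | hx
      · exact List.mem_append_left _ hx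
      · simp at hx; simp [hx]
    · refine ih (cur ++ [c]) ?_ (fun x hx => hsub x (List.mem_cons_of_mem c hx)) ?_ ?_
      · simpa using hnd
      · have : (cur ++ [c]) ++ ext = cur ++ c :: ext := by simp
        rw [this]; exact hcl
      · simp; omega
theorem nodup_extendClique (d : PySem.Dict String (List String)) (start : String) (size : Int) :
    ∀ (fuel : Nat) (cur : List String) (acc : PySem.Set (List String)),
      acc.Nodup → (extendClique d start size fuel cur acc).Nodup := by
  intro fuel
  induction fuel with
  | zero => intro cur acc h; simpa [extendClique] using h
  | succ fuel ih =>
    intro cur acc h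
    rw [extendClique]
    split
    · exact PySem.Set.nodup_add _ _ h
    · exact nodup_foldl_step _ _ _
        (fun cl c hnd => by
          split
          · exact ih _ cl hnd
          · exact hnd) h

theorem mem_extendClique (d : PySem.Dict String (List String)) (start : String) (size : Int) :
    ∀ (fuel : Nat) (cur : List String) (acc : PySem.Set (List String)) (t : List String),
      cur.Nodup → (∀ x ∈ cur, x = start ∨ x ∈ d.getD start []) →
      ((d.getD start []).length + 2 ≤ cur.length + fuel) →
      (t ∈ extendClique d start size fuel cur acc ↔
        t ∈ acc ∨ ∃ ext, Chain d start size cur ext ∧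
          t = PySem.List.sorted (cur ++ ext) (fun x => x) false) := by
  intro fuel
  induction fuel with
  | zero =>
    intro cur acc t hnd hsub hf
    exfalso
    have hle : cur.length ≤ ((start :: d.getD start []).length) := by
      have : cur ⊆ start :: d.getD start [] := by
        intro x hx
        rcases hsub x hx with rfl | hx2
        · exact List.mem_cons_self
        · exact List.mem_cons_of_mem _ hx2
      exact (List.Nodup.subperm hnd this).length_le
    simp at hle
    omega
  | succ fuel ih =>
    intro cur acc t hnd hsub hf
    rw [extendClique]
    by_cases hlen : (cur.length : Int) = size
    · rw [if_pos hlen, PySem.Set.mem_add]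
      constructor
      · rintro (h | h)
        · exact Or.inl h
        · exact Or.inr ⟨[], hlen, by simpa using h⟩
      · rintro (h | ⟨ext, hch, ht⟩)
        · exact Or.inl h
        · cases ext with
          | nil => exact Or.inr (by simpa using ht)
          | cons c ext => exact absurd hlen hch.1
    · rw [if_neg hlen]
      rw [mem_foldl_step t
        (fun c => pyIsClique d (cur ++ [c]) = true ∧
          ∃ ext, Chain d start size (cur ++ [c]) ext ∧
            t = PySem.List.sorted ((cur ++ [c]) ++ ext) (fun x => x) false)]
      · constructor
        · rintro (h | ⟨c, hc, hcl, ext, hch, ht⟩)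
          · exact Or.inl h
          · exact Or.inr ⟨c :: ext, ⟨hlen, hc, hcl, hch⟩, by simpa using ht⟩
        · rintro (h | ⟨ext, hch, ht⟩)
          · exact Or.inl h
          · cases ext with
            | nil => exact absurd hch hlen
            | cons c ext =>
              exact Or.inr ⟨c, hch.2.1, hch.2.2.1, ext, hch.2.2.2, by simpa using ht⟩
      · intro cl c hc
        have hc' : c ∈ candSet d start cur := hc
        have hprops := (mem_candSet d start cur c).1 hc'
        have hadd : PySem.Set.add cur c = cur ++ [c] := set_add_of_not_mem cur c hprops.2
        rw [hadd]
        split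
        · rename_i hcl
          rw [ih (cur ++ [c]) cl t ?_ ?_ ?_]
          · constructor
            · rintro (h | h)
              · exact Or.inl h
              · exact Or.inr ⟨hcl, h⟩
            · rintro (h | ⟨_, h⟩)
              · exact Or.inl h
              · exact Or.inr h
          · simp [List.nodup_append, hnd]
            exact fun a ha hac => hprops.2 (hac ▸ ha)
          · intro x hx
            rcases List.mem_append.1 hx with hx | hx
            · exact hsub x hx
            · simp at hx
              exact Or.inr (hx ▸ hprops.1.1)
          · simp
            omega
        · rename_i hcl
          constructor
          · exact Or.inl
          · rintro (h | ⟨h, _⟩)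
            · exact h
            · exact absurd h hcl

theorem pyIsClique_singleton (d : PySem.Dict String (List String)) (x : String) :
    pyIsClique d [x] = true := by simp [pyIsClique]

theorem bridge (d : PySem.Dict String (List String)) (start : String) (size : Int)
    (hsize : 1 ≤ size) (t : List String) :
    (∃ ext, Chain d start size [start] ext ∧
        t = PySem.List.sorted ([start] ++ ext) (fun x => x) false) ↔
    (∃ combo ∈ PySem.List.combinations
        (PySem.Set.diff (PySem.Set.ofList (d.getD start [])) [start]) (size - 1).toNat,
      pyIsClique d (start :: combo) = true ∧
        t = PySem.List.sorted (start :: combo) (fun x => x) false) := by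
  constructor
  · rintro ⟨ext, hch, ht⟩
    have hlen1 : ((1 : Nat) + ext.length : Int) = size := by
      simpa using chain_length d start size ext [start] hch
    have hnd : (start :: ext).Nodup := by
      simpa using chain_nodup d start size ext [start] (by simp) hch
    have hstartnot : start ∉ ext := (List.nodup_cons.1 hnd).1
    have hextnd : ext.Nodup := (List.nodup_cons.1 hnd).2
    have hsubpool : ext ⊆ PySem.Set.diff (PySem.Set.ofList (d.getD start [])) [start] := by
      intro x hx
      rw [PySem.Set.mem_diff, PySem.Set.mem_ofList]
      refine ⟨chain_subset d start size ext [start] hch x hx, ?_⟩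
      simp
      rintro rfl
      exact hstartnot hx
    obtain ⟨combo, hperm, hsl⟩ := List.Nodup.subperm hextnd hsubpool
    have hcliqext : cliqueProp d (start :: ext) := by
      rw [← pyIsClique_iff]
      simpa using chain_clique d start size ext [start] (pyIsClique_singleton d start) hch
    refine ⟨combo, ?_, ?_, ?_⟩
    · rw [PySem.List.mem_combinations_iff]
      have := hperm.length_eq
      refine ⟨hsl, ?_⟩
      omega
    · rw [pyIsClique_iff]
      refine cliqueProp_subset' d ?_ hcliqext
      intro x hx
      rcases List.mem_cons.1 hx with rfl | hx
      · exact List.mem_cons_self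
      · exact List.mem_cons_of_mem _ (hperm.subset hx)
    · rw [ht, show ([start] ++ ext) = start :: ext from by simp]
      exact PySem.List.sorted_eq_sorted_of_perm _ _ _ (fun a b h => h)
        (List.Perm.cons start hperm.symm)
  · rintro ⟨combo, hmem, hcl, ht⟩
    rw [PySem.List.mem_combinations_iff] at hmem
    obtain ⟨hsl, hlenc⟩ := hmem
    have hpoolnd : (PySem.Set.diff (PySem.Set.ofList (d.getD start [])) [start]).Nodup :=
      PySem.Set.nodup_diff _ _ (PySem.Set.nodup_ofList _)
    have hcombond : combo.Nodup := List.Nodup.sublist hsl hpoolnd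
    have hsubp := hsl.subset
    have hstartnot : start ∉ combo := by
      intro h
      have := hsubp h
      rw [PySem.Set.mem_diff] at this
      exact this.2 List.mem_cons_self
    have hsubnb : ∀ c ∈ combo, c ∈ d.getD start [] := by
      intro c hc
      have := hsubp hc
      rw [PySem.Set.mem_diff, PySem.Set.mem_ofList] at this
      exact this.1
    refine ⟨combo, ?_, ?_⟩
    · refine chain_of d start size combo [start] ?_ hsubnb ?_ ?_
      · simp [hstartnot, hcombond]
      · rw [show ([start] ++ combo) = start :: combo from by simp, ← pyIsClique_iff]
        exact hcl
      · simp
        omega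
    · rw [show ([start] ++ combo) = start :: combo from by simp]
      exact ht

-- canonSort facts (instance-pinned uses of the PySem sorted lemmas)
theorem canonSort_eq_nil (l : List (List String)) : canonSort l = [] ↔ l = [] := by
  unfold canonSort
  exact @PySem.List.sorted_eq_nil_iff _ _ List.instLinearOrder.toLT
    (@LinearOrder.toDecidableLT _ List.instLinearOrder) l _ _

theorem canonSort_eq_of_perm {l1 l2 : List (List String)} (h : l1.Perm l2) :
    canonSort l1 = canonSort l2 := by
  unfold canonSort
  exact PySem.List.sorted_eq_sorted_of_perm _ _ _ (fun a b h => h) h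


theorem find_cliques_eq_alt : ∀ (nodes : List (String × List String)) (start : String) (size : Int),
    find_cliques nodes start size = find_cliques_alt nodes start size := by
  intro nodes start size
  simp only [find_cliques, find_cliques_alt]
  have hAmem : ∀ t, t ∈ extendClique (PySem.Dict.mk nodes) start size
      (((PySem.Dict.mk nodes).getD start []).length + 2) [start] PySem.Set.empty ↔
      ∃ ext, Chain (PySem.Dict.mk nodes) start size [start] ext ∧
        t = PySem.List.sorted ([start] ++ ext) (fun x => x) false := by
    intro t
    rw [mem_extendClique (PySem.Dict.mk nodes) start size _ [start] _ t (by simp)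
      (by intro x hx; simp at hx; exact Or.inl hx) (by simp)]
    simp [PySem.Set.empty]
  by_cases hsize : size < 1
  · rw [if_pos hsize, canonSort_eq_nil, List.eq_nil_iff_forall_not_mem]
    intro t ht
    obtain ⟨ext, hch, -⟩ := (hAmem t).1 ht
    have := chain_length _ start size ext [start] hch
    simp at this
    omega
  · rw [if_neg hsize]
    by_cases hone : size = 1
    · rw [if_pos hone]
      have h1 : (([start].length : Nat) : Int) = size := by simp [hone]
      show canonSort (extendClique (PySem.Dict.mk nodes) start size
        (((PySem.Dict.mk nodes).getD start []).length + 1 + 1) [start] PySem.Set.empty) = [[start]]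
      rw [extendClique, if_pos h1]
      have hs1 : PySem.List.sorted [start] (fun x => x) false = [start] :=
        PySem.List.sorted_eq_self_of_pairwise _ _ (List.pairwise_singleton _ _)
      rw [hs1]
      have : PySem.Set.add PySem.Set.empty [start] = [[start]] := by
        simp [PySem.Set.add, PySem.Set.empty, PySem.Set.contains]
      rw [this]
      unfold canonSort
      exact PySem.List.sorted_eq_self_of_pairwise _ _ (List.pairwise_singleton _ _)
    · rw [if_neg hone]
      push Not at hsize
      apply canonSort_eq_of_perm
      rw [List.perm_ext_iff_of_nodup]
      · intro t
        rw [hAmem t, bridge _ _ _ hsize t]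
        rw [mem_foldl_step t
          (fun combo => pyIsClique (PySem.Dict.mk nodes) (start :: combo) = true ∧
            t = PySem.List.sorted (start :: combo) (fun x => x) false)]
        · simp [PySem.Set.empty]
        · intro cl c _
          split
          · rename_i hcl
            rw [PySem.Set.mem_add]
            constructor
            · rintro (h | h)
              · exact Or.inl h
              · exact Or.inr ⟨hcl, h⟩
            · rintro (h | ⟨-, h⟩)
              · exact Or.inl h
              · exact Or.inr h
          · rename_i hcl
            constructor
            · exact Or.inl
            · rintro (h | ⟨h, -⟩)
              · exact h
              · exact absurd h hcl
      · exact nodup_extendClique _ _ _ _ _ _ (by simp [PySem.Set.empty])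
      · refine nodup_foldl_step _ _ _ ?_ (by simp [PySem.Set.empty])
        intro cl c hnd
        split
        · exact PySem.Set.nodup_add _ _ hnd
        · exact hnd

-- ===== VERDICT (by name: the statement is the Claim_ definition above) =====
theorem find_cliques_spec : Claim_equal_find_cliques := by
  intro nodes start size _ _
  unfold Spec_find_cliques
  exact find_cliques_eq_alt nodes start size
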